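-- pv_equiv track=rewrite | github.com/sharif110/PF-course-Full | a04.py | openLocks
-- ===== SOURCE A (Python) =====
-- def openLocks(lock,std):
--     if lock == 0 or std == 0:
--         return 0
--     if lock < 0 or std < 0:
--         return None
--     locks = [False]*lock
--     for c in range(1,std+1):
--         for d in range(1,lock+1):
--             if d%c == 0:
--                 if locks[d-1] == True:
--                     locks[d-1] = False
--                 else:
--                         locks[d-1] = True
--     true = 0
--     for h in range(1,lock+1):
--         if locks[h-1] == True:
--             true = true +1
--     return true
-- ===== SOURCE B (Python) =====
-- def openLocks(lock, std):
--     if lock == 0 or std == 0: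
--         return 0
--     if lock < 0 or std < 0:
--         return None
--     def toggles(d):
--         return sum(1 for c in range(1, std + 1) if d % c == 0)
--     return sum(1 for d in range(1, lock + 1) if toggles(d) % 2 == 1)
-- ===== Notes on version B (the rewrite author's own statement) =====
-- stated objective: alternative
-- what changed: B inverts the loop nest and drops the mutable locker array entirely: per locker d it counts the divisors c <= std and keeps d iff that count is odd, instead of toggling a boolean list pass by pass and counting the True entries.
import Mathlib
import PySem

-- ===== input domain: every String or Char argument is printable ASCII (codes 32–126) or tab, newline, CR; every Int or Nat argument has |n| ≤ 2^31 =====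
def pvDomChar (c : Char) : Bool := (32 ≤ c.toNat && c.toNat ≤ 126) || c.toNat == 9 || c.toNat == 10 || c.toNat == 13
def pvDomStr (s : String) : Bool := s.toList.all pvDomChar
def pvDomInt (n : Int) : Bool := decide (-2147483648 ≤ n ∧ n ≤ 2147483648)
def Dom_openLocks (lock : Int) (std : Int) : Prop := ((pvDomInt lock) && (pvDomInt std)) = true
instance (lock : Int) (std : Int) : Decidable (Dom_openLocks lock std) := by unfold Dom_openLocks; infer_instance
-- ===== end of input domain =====

-- B inverts the loop nest and drops the mutable locker array: per locker d it counts the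
-- divisors c ≤ std and keeps d iff that count is odd (same cost, different decomposition).

-- ===== PORT A =====
def openLocks (lock : Int) (std : Int) : Option Int :=
  if lock == 0 || std == 0 then some 0
  else if lock < 0 || std < 0 then none
  else
    let locks0 : List Bool := PySem.List.pyRepeat [false] lock
    let locks1 := (PySem.List.pyRange 1 (std+1)).foldl (fun locks c =>
      (PySem.List.pyRange 1 (lock+1)).foldl (fun locks d =>
        if PySem.Int.mod d c == 0 then
          if PySem.List.pyGetD locks (d-1) false == true then
            PySem.List.pySetD locks (d-1) false
          else
            PySem.List.pySetD locks (d-1) true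
        else locks) locks) locks0
    some ((PySem.List.pyRange 1 (lock+1)).foldl (fun t h =>
      if PySem.List.pyGetD locks1 (h-1) false == true then t + 1 else t) (0:Int))

-- ===== PORT B =====
def openLocks_alt (lock : Int) (std : Int) : Option Int :=
  if lock == 0 || std == 0 then some 0
  else if lock < 0 || std < 0 then none
  else
    -- toggles(d) = sum(1 for c in range(1, std+1) if d % c == 0), a 0/1-sum IS List.countP
    some (((PySem.List.pyRange 1 (lock+1)).countP (fun d =>
      ((PySem.List.pyRange 1 (std+1)).countP (fun c => PySem.Int.mod d c == 0)) % 2 == 1) : Nat) : Int)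

-- ===== PRECONDITION & SPEC =====
def Spec_openLocks (lock : Int) (std : Int) (out : Option Int) : Prop := out = openLocks_alt lock std
instance (lock : Int) (std : Int) (out : Option Int) : Decidable (Spec_openLocks lock std out) := by unfold Spec_openLocks; infer_instance

-- ===== CLAIM (what is proved, stated in full; the proofs are below) =====
def Claim_equal_openLocks : Prop := ∀ (lock : Int) (std : Int), Dom_openLocks lock std → Spec_openLocks lock std (openLocks lock std)

-- ===== LEMMAS AND PROOFS =====

/-- State after one pass with toggle step `c`, bounded by locker number `m`:
locker `i+1` flipped iff it is a multiple of `c` not exceeding `m`. -/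
def pvFlip (c m : Nat) (L : List Bool) : List Bool :=
  L.mapIdx (fun i b => if c ∣ (i+1) ∧ i+1 ≤ m then !b else b)

theorem pvFlip_length (c m : Nat) (L : List Bool) : (pvFlip c m L).length = L.length := by
  simp [pvFlip]

theorem pvFlip_zero (c : Nat) (L : List Bool) : pvFlip c 0 L = L := by
  apply List.ext_getElem
  · simp [pvFlip]
  · intro i h1 h2
    simp only [pvFlip, List.getElem_mapIdx]
    rw [if_neg (by omega)]

theorem pvFlip_cond_congr (c m m' : Nat) (L : List Bool)
    (h : ∀ i, i < L.length → c ∣ (i+1) → ((i+1 ≤ m) ↔ (i+1 ≤ m'))) :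
    pvFlip c m L = pvFlip c m' L := by
  apply List.ext_getElem
  · simp [pvFlip]
  · intro i h1 h2
    simp only [pvFlip, List.getElem_mapIdx]
    by_cases hd : c ∣ (i+1)
    · have := h i (by simpa [pvFlip] using h1) hd
      split_ifs <;> tauto
    · rw [if_neg (by tauto), if_neg (by tauto)]

theorem toggle_pvFlip (c m m' p : Nat) (L : List Bool)
    (hdvd : c ∣ (p+1)) (hold : ¬ (p+1 ≤ m)) (hnew : p+1 ≤ m')
    (hother : ∀ i, c ∣ (i+1) → i ≠ p → ((i+1 ≤ m) ↔ (i+1 ≤ m'))) :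
    (pvFlip c m L).set p (!((pvFlip c m L).getD p false)) = pvFlip c m' L := by
  apply List.ext_getElem
  · simp [pvFlip]
  · intro i h1 h2
    have hiL : i < L.length := by simpa [pvFlip] using h2
    rw [List.getElem_set]
    by_cases hip : p = i
    · subst hip
      have hpL : p < L.length := hiL
      have hget : (pvFlip c m L).getD p false = (pvFlip c m L)[p]'(by simpa [pvFlip] using hpL) := by
        rw [List.getD_eq_getElem]
      rw [if_pos rfl, hget]
      simp only [pvFlip, List.getElem_mapIdx]
      rw [if_neg (by tauto), if_pos ⟨hdvd, hnew⟩]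
    · rw [if_neg hip]
      simp only [pvFlip, List.getElem_mapIdx]
      by_cases hd : c ∣ (i+1)
      · have := hother i hd (fun h => hip h.symm)
        split_ifs <;> tauto
      · rw [if_neg (by tauto), if_neg (by tauto)]

/-- A's inner loop over all lockers `d = 1..n`, toggling where `c ∣ d`, is one `pvFlip` pass. -/
theorem innerA_eq (c : Nat) (_hc : 0 < c) (n : Nat) (L : List Bool) :
    (PySem.List.pyRange 1 ((n:Int)+1)).foldl (fun locks d =>
        if PySem.Int.mod d (c:Int) == 0 then
          if PySem.List.pyGetD locks (d-1) false == true then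
            PySem.List.pySetD locks (d-1) false
          else
            PySem.List.pySetD locks (d-1) true
        else locks) L = pvFlip c n L := by
  induction n with
  | zero =>
      rw [PySem.List.pyRange_one_eq_nil (by norm_num)]
      simp [pvFlip_zero]
  | succ n ih =>
      have hcast : ((n+1 : Nat) : Int) + 1 = ((n:Int)+1) + 1 := by push_cast; ring
      rw [hcast, PySem.List.pyRange_one_succ_right (by omega), List.foldl_append, ih]
      simp only [List.foldl_cons, List.foldl_nil]
      by_cases hd : c ∣ (n+1)
      · have hmod : PySem.Int.mod ((n:Int)+1) (c:Int) = 0 := by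
          rw [PySem.Int.mod_eq_zero_iff_dvd]
          exact_mod_cast Int.natCast_dvd_natCast.mpr hd
        rw [if_pos (by simp [hmod])]
        have hidx : ((n:Int)+1-1) = ((n:Nat):Int) := by ring
        rw [hidx, PySem.List.pyGetD_natCast, PySem.List.pySetD_natCast, PySem.List.pySetD_natCast]
        have htog := toggle_pvFlip c n (n+1) n L hd (by omega) (by omega)
          (fun i hdi hne => by omega)
        rw [← htog]
        cases hb : (pvFlip c n L).getD n false <;> simp
      · have hmod : ¬ PySem.Int.mod ((n:Int)+1) (c:Int) = 0 := by
          rw [PySem.Int.mod_eq_zero_iff_dvd]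
          intro h
          exact hd (by exact_mod_cast h)
        rw [if_neg (by simp [hmod])]
        exact pvFlip_cond_congr c n (n+1) L (fun i _ hdi => by
          constructor
          · omega
          · intro h
            by_cases h' : i + 1 = n + 1
            · exact absurd (h' ▸ hdi) hd
            · omega)

theorem pvParitySucc (k : Nat) : (((k+1) % 2 == 1) : Bool) = !(k % 2 == 1) := by
  rcases Nat.mod_two_eq_zero_or_one k with h | h
  · have h2 : (k+1) % 2 = 1 := by omega
    simp [h, h2]
  · have h2 : (k+1) % 2 = 0 := by omega
    simp [h, h2]

/-- Folding `pvFlip` passes over any list of steps: entry `i` ends up as the initial entry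
XORed with the parity of the number of passes that touch locker `i+1`. -/
theorem foldl_pvFlip_getD (n : Nat) (cs : List Int) (L : List Bool) (i : Nat) (hi : i < L.length) :
    (cs.foldl (fun L c => pvFlip c.toNat n L) L).getD i false
      = xor (L.getD i false)
          ((cs.countP (fun c => decide (c.toNat ∣ (i+1)) && decide (i+1 ≤ n))) % 2 == 1) := by
  induction cs generalizing L with
  | nil => simp
  | cons c cs ih =>
      simp only [List.foldl_cons, List.countP_cons]
      rw [ih _ (by rw [pvFlip_length]; exact hi)]
      have hgd : (pvFlip c.toNat n L).getD i false
          = (if c.toNat ∣ (i+1) ∧ i+1 ≤ n then !(L.getD i false) else L.getD i false) := by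
        rw [List.getD_eq_getElem _ _ (by rw [pvFlip_length]; exact hi),
          List.getD_eq_getElem _ _ hi]
        simp [pvFlip]
      rw [hgd]
      by_cases hc : c.toNat ∣ (i+1) ∧ i+1 ≤ n
      · rw [if_pos hc]
        have hpt : (decide (c.toNat ∣ (i+1)) && decide (i+1 ≤ n)) = true := by
          simp [hc.1, hc.2]
        rw [hpt, if_pos rfl, pvParitySucc]
        cases hb : L.getD i false <;>
          cases hcb : ((List.countP (fun c => decide (c.toNat ∣ (i+1)) && decide (i+1 ≤ n)) cs) % 2 == 1) <;>
            simp only [hcb, hb, Bool.not_true, Bool.not_false, Bool.true_xor, Bool.false_xor,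
              Bool.xor_true, Bool.xor_false, Bool.not_not]
      · rw [if_neg hc]
        have hpt : (decide (c.toNat ∣ (i+1)) && decide (i+1 ≤ n)) = false := by
          rcases Decidable.not_and_iff_or_not.mp hc with h | h <;> simp [h]
        rw [hpt]
        simp

-- ===== VERDICT (by name: the statement is the Claim_ definition above) =====
theorem openLocks_spec : Claim_equal_openLocks := by
  unfold Claim_equal_openLocks
  intro lock std _
  unfold Spec_openLocks openLocks openLocks_alt
  by_cases h0 : (lock == 0 || std == 0) = true
  · rw [if_pos h0, if_pos h0]
  · rw [if_neg h0, if_neg h0]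
    by_cases h1 : (decide (lock < 0) || decide (std < 0)) = true
    · rw [if_pos h1, if_pos h1]
    · rw [if_neg h1, if_neg h1]
      simp only []
      have hlock : 0 < lock := by
        simp only [Bool.or_eq_true, beq_iff_eq, decide_eq_true_eq, not_or] at h0 h1
        omega
      set n := lock.toNat with hn
      have hlockn : lock = ((n:Nat):Int) := by omega
      rw [hlockn]
      have hrep : PySem.List.pyRepeat [false] ((n:Nat):Int) = List.replicate n false := by
        rw [PySem.List.pyRepeat_singleton]
        simp
      rw [hrep]
      have houter : (PySem.List.pyRange 1 (std+1)).foldl (fun locks c =>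
            (PySem.List.pyRange 1 (((n:Nat):Int)+1)).foldl (fun locks d =>
              if PySem.Int.mod d c == 0 then
                if PySem.List.pyGetD locks (d-1) false == true then
                  PySem.List.pySetD locks (d-1) false
                else
                  PySem.List.pySetD locks (d-1) true
              else locks) locks) (List.replicate n false)
          = (PySem.List.pyRange 1 (std+1)).foldl (fun L c => pvFlip c.toNat n L)
              (List.replicate n false) := by
        apply PySem.List.foldl_congr_mem
        intro acc c hc
        have hc1 : 1 ≤ c := ((PySem.List.mem_pyRange_one).mp hc).1
        have hcc : c = ((c.toNat:Nat):Int) := by omega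
        rw [hcc, innerA_eq c.toNat (by omega) n acc, Int.toNat_natCast]
      rw [houter]
      set Lf := (PySem.List.pyRange 1 (std+1)).foldl (fun L c => pvFlip c.toNat n L)
        (List.replicate n false) with hLf
      have hentry : ∀ h : Int, h ∈ PySem.List.pyRange 1 (((n:Nat):Int)+1) →
          PySem.List.pyGetD Lf (h-1) false
            = (((PySem.List.pyRange 1 (std+1)).countP (fun c => PySem.Int.mod h c == 0)) % 2 == 1) := by
        intro h hm
        have hb := (PySem.List.mem_pyRange_one).mp hm
        set k := (h-1).toNat with hk
        have hhk : h - 1 = ((k:Nat):Int) := by omega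
        have hkn : k < n := by omega
        rw [hhk, PySem.List.pyGetD_natCast, hLf,
          foldl_pvFlip_getD n _ _ k (by simp; omega)]
        have hL0 : (List.replicate n false).getD k false = false := by
          rw [List.getD_eq_getElem _ _ (by simpa using hkn)]
          simp
        rw [hL0]
        have hcp : (PySem.List.pyRange 1 (std+1)).countP
              (fun c => decide (c.toNat ∣ (k+1)) && decide (k+1 ≤ n))
            = (PySem.List.pyRange 1 (std+1)).countP (fun c => PySem.Int.mod h c == 0) := by
          apply List.countP_congr
          intro c hcm
          have hc1 : 1 ≤ c := ((PySem.List.mem_pyRange_one).mp hcm).1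
          have hmodd : (PySem.Int.mod h c == 0) = decide (c ∣ h) := by
            rcases Decidable.em (c ∣ h) with hd | hd
            · simp [PySem.Int.mod_eq_zero_iff_dvd, hd]
            · simp [PySem.Int.mod_eq_zero_iff_dvd, hd]
          have hdvd : (c ∣ h) ↔ (c.toNat ∣ (k+1)) := by
            have hh : h = (((k+1:Nat)):Int) := by omega
            have hcc : c = ((c.toNat:Nat):Int) := by omega
            conv_lhs => rw [hcc, hh]
            exact Int.natCast_dvd_natCast
          rw [hmodd]
          have hkn' : decide (k+1 ≤ n) = true := by simp; omega
          rw [hkn']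
          simp [hdvd]
        rw [hcp]
        simp
      have hcnt : (PySem.List.pyRange 1 (((n:Nat):Int)+1)).foldl (fun t h =>
            if PySem.List.pyGetD Lf (h-1) false == true then t + 1 else t) (0:Int)
          = (PySem.List.pyRange 1 (((n:Nat):Int)+1)).foldl (fun t h =>
            if (((PySem.List.pyRange 1 (std+1)).countP (fun c => PySem.Int.mod h c == 0)) % 2 == 1) then t + 1 else t) (0:Int) := by
        apply PySem.List.foldl_congr_mem
        intro acc h hm
        rw [hentry h hm]
        simp
      rw [hcnt, PySem.List.foldl_if_add_one]
      simp
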